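-- pv_equiv track=rewrite | github.com/hyeon-marina/coding-test-preparation | Python3/프로그래머스/3/388354. 홀짝트리/홀짝트리.py | solution
-- ===== SOURCE A (Python) =====
-- from collections import defaultdict, deque
--
-- def solution(nodes, edges):
--     graph = defaultdict(list)
--     # 그래프 생성 (무향)
--     for a, b in edges:
--         graph[a].append(b)
--         graph[b].append(a)
--     # isolated node 도 키로 보장
--     for n in nodes:
--         if n not in graph:
--             graph[n] = []
--
--     visited = set()
--     ans_hol = 0   # 홀짝 트리 개수
--     ans_rev = 0   # 역홀짝 트리 개수
--
--     for start in nodes: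
--         if start in visited:
--             continue
--         # 컴포넌트 수집 (BFS)
--         q = deque([start])
--         visited.add(start)
--         comp = []
--         while q:
--             u = q.popleft()
--             comp.append(u)
--             for v in graph[u]:
--                 if v not in visited:
--                     visited.add(v)
--                     q.append(v)
--
--         hol_nonroot_cnt = 0   # 비-루트 가정에서 '홀짝 노드'인 개수
--         rev_nonroot_cnt = 0   # 비-루트 가정에서 '역홀짝 노드'인 개수
--
--         for u in comp:
--             deg = len(graph[u])
--             nonroot_children = deg - 1
--             # 비-루트일 때의 자식 개수의 홀짝과 노드 번호 홀짝 비교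
--             if (u % 2) == (nonroot_children % 2):
--                 hol_nonroot_cnt += 1
--             else:
--                 rev_nonroot_cnt += 1
--
--         # rev_nonroot_cnt == 1 이면 그 1개를 루트로 택하면 전체가 '홀짝 트리'가 됨
--         if rev_nonroot_cnt == 1:
--             ans_hol += 1
--         # hol_nonroot_cnt == 1 이면 그 1개를 루트로 택하면 전체가 '역홀짝 트리'가 됨
--         if hol_nonroot_cnt == 1:
--             ans_rev += 1
--
--     return [ans_hol, ans_rev]
-- ===== SOURCE B (Python) =====
-- def solution(nodes, edges):
--     # Label-propagation instead of BFS: count degrees directly from the edge list,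
--     # give every vertex its own label and merge the two labels of each edge by a
--     # relabelling scan; a component is then an equal-label class, so no adjacency
--     # lists, queue or graph traversal are needed.
--     deg = {}
--     for a, b in edges:
--         deg[a] = deg.get(a, 0) + 1
--         deg[b] = deg.get(b, 0) + 1
--     for n in nodes:
--         deg.setdefault(n, 0)
--
--     label = {v: v for v in deg}
--     for a, b in edges:
--         la, lb = label[a], label[b]
--         if la != lb:
--             for v in label:
--                 if label[v] == lb:
--                     label[v] = la
--
--     done = set()
--     ans_hol = 0
--     ans_rev = 0
--     for start in nodes:
--         l0 = label[start]
--         if l0 in done: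
--             continue
--         done.add(l0)
--         hol = 0
--         rev = 0
--         for u in label:
--             if label[u] == l0:
--                 if u % 2 == (deg[u] - 1) % 2:
--                     hol += 1
--                 else:
--                     rev += 1
--         if rev == 1:
--             ans_hol += 1
--         if hol == 1:
--             ans_rev += 1
--     return [ans_hol, ans_rev]
-- ===== Notes on version B (the rewrite author's own statement) =====
-- stated objective: alternative
-- what changed: A builds adjacency lists and walks every component with a BFS (deque) before counting; B never builds a graph or traverses it: it counts degrees straight off the edge list, gives each vertex its own label and merges the two labels of every edge by a relabelling scan, so a component is simply an equal-label class that is counted by filtering the label table.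
import Mathlib
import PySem

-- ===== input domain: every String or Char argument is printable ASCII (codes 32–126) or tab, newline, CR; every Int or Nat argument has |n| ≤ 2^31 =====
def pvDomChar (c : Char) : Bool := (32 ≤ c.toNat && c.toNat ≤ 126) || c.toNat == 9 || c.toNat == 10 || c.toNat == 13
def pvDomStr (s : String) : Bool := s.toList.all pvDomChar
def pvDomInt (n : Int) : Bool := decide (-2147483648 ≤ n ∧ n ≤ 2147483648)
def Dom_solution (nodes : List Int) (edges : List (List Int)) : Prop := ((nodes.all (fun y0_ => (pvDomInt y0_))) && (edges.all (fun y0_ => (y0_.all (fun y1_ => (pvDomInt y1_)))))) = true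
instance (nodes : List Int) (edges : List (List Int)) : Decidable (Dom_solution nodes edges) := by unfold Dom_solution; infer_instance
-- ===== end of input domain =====

-- B replaces A's graph traversal wholesale: no adjacency lists, queue or BFS — degrees are
-- counted straight off the edge list and components are built as equal-label classes by
-- merging the two labels of each edge with a relabelling scan. (alternative; not faster)

-- ===== PORT A =====
-- graph[a].append(b) on a defaultdict(list): append [] entry if missing, extend in place
-- (Dict.insert overwrites in place, appends new keys — exact).
def pvAdjStepA (g : PySem.Dict Int (List Int)) (e : List Int) : PySem.Dict Int (List Int) :=
  match e with
  | a :: b :: _ =>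
      let g := g.insert a (g.getD a [] ++ [b])
      g.insert b (g.getD b [] ++ [a])
  | _ => g   -- 'a, b = e' raises ValueError here: excluded by Pre_solution

def pvGraphA (nodes : List Int) (edges : List (List Int)) : PySem.Dict Int (List Int) :=
  nodes.foldl (fun g n => if g.contains n then g else g.insert n [])
    (edges.foldl pvAdjStepA PySem.Dict.empty)

-- the BFS 'while q:' loop; fuel ≥ |q| + #unvisited keys never runs out (proved below).
def pvBFSA (g : PySem.Dict Int (List Int)) :
    Nat → PySem.Set Int → List Int → List Int → PySem.Set Int × List Int
  | 0, visited, _q, comp => (visited, comp)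
  | fuel+1, visited, q, comp =>
    match q with
    | [] => (visited, comp)
    | u :: qs =>
      let s := (g.getD u []).foldl
        (fun (s : PySem.Set Int × List Int) v =>
          if PySem.Set.contains s.1 v then s else (PySem.Set.add s.1 v, s.2 ++ [v]))
        (visited, qs)
      pvBFSA g fuel s.1 s.2 (comp ++ [u])

def solution (nodes : List Int) (edges : List (List Int)) : List Int :=
  let g := pvGraphA nodes edges
  let st := nodes.foldl
    (fun (st : PySem.Set Int × Int × Int) start =>
      if PySem.Set.contains st.1 start then st
      else
        let r := pvBFSA g (g.keys.length + 1) (PySem.Set.add st.1 start) [start] []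
        let c := r.2.foldl
          (fun (c : Int × Int) u =>
            if PySem.Int.mod u 2 == PySem.Int.mod (PySem.List.len (g.getD u []) - 1) 2
            then (c.1 + 1, c.2) else (c.1, c.2 + 1)) (0, 0)
        (r.1, (if c.2 == 1 then st.2.1 + 1 else st.2.1),
              (if c.1 == 1 then st.2.2 + 1 else st.2.2)))
    (PySem.Set.empty, 0, 0)
  [st.2.1, st.2.2]

-- ===== PORT B =====
-- deg[a] = deg.get(a, 0) + 1 ; deg[b] = deg.get(b, 0) + 1
def pvDegStep (d : PySem.Dict Int Int) (e : List Int) : PySem.Dict Int Int :=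
  match e with
  | a :: b :: _ =>
      let d := d.insert a (d.getD a 0 + 1)
      d.insert b (d.getD b 0 + 1)
  | _ => d   -- 'a, b = e' raises ValueError here: excluded by Pre_solution

def pvDeg (nodes : List Int) (edges : List (List Int)) : PySem.Dict Int Int :=
  nodes.foldl (fun d n => d.setdefault n 0) (edges.foldl pvDegStep PySem.Dict.empty)

-- la, lb = label[a], label[b]; if la != lb: relabel every vertex labelled lb to la.
-- label[a] / label[b] cannot raise KeyError: every edge endpoint is a key of deg, hence of
-- label, so the getD default 0 is never used.
def pvRelabelStep (L : PySem.Dict Int Int) (e : List Int) : PySem.Dict Int Int :=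
  match e with
  | a :: b :: _ =>
      let la := L.getD a 0
      let lb := L.getD b 0
      if la == lb then L
      else L.keys.foldl (fun L' v => if L'.getD v 0 == lb then L'.insert v la else L') L
  | _ => L   -- 'a, b = e' raises ValueError here: excluded by Pre_solution

-- label = {v: v for v in deg}, then one merge pass per edge
def pvLabels (deg : PySem.Dict Int Int) (edges : List (List Int)) : PySem.Dict Int Int :=
  edges.foldl pvRelabelStep (deg.keys.foldl (fun L v => L.insert v v) PySem.Dict.empty)

def solution_alt (nodes : List Int) (edges : List (List Int)) : List Int :=
  let deg := pvDeg nodes edges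
  let label := pvLabels deg edges
  let st := nodes.foldl
    (fun (st : PySem.Set Int × Int × Int) start =>
      let l0 := label.getD start 0   -- label[start]: start is a key (deg.setdefault), default unused
      if PySem.Set.contains st.1 l0 then st
      else
        let c := label.keys.foldl
          (fun (c : Int × Int) u =>
            if label.getD u 0 == l0 then
              if PySem.Int.mod u 2 == PySem.Int.mod (deg.getD u 0 - 1) 2
              then (c.1 + 1, c.2) else (c.1, c.2 + 1)
            else c) (0, 0)
        (PySem.Set.add st.1 l0,
         (if c.2 == 1 then st.2.1 + 1 else st.2.1),
         (if c.1 == 1 then st.2.2 + 1 else st.2.2)))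
    (PySem.Set.empty, 0, 0)
  [st.2.1, st.2.2]

-- ===== PRECONDITION & SPEC =====
-- Pre_ excludes exactly the inputs where A raises: 'a, b = e' throws ValueError
-- unless the edge has exactly two entries.
def Pre_solution (nodes : List Int) (edges : List (List Int)) : Prop :=
  ∀ e ∈ edges, e.length = 2
instance (nodes : List Int) (edges : List (List Int)) : Decidable (Pre_solution nodes edges) := by
  unfold Pre_solution; infer_instance

def pvWitness_solution : List Int × List (List Int) := ([1, 2, 3], [[1, 2], [2, 3]])

def Spec_solution (nodes : List Int) (edges : List (List Int)) (out : List Int) : Prop :=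
  out = solution_alt nodes edges
instance (nodes : List Int) (edges : List (List Int)) (out : List Int) :
    Decidable (Spec_solution nodes edges out) := by unfold Spec_solution; infer_instance

-- ===== CLAIM (what is proved, stated in full; the proofs are below) =====
def Claim_equal_solution : Prop :=
  ∀ (nodes : List Int) (edges : List (List Int)), Dom_solution nodes edges →
    Pre_solution nodes edges → Spec_solution nodes edges (solution nodes edges)

-- ===== LEMMAS AND PROOFS =====

-- ---- connectivity: the common spec both programs are measured against ----

-- w is adjacent to v in A's graph
-- the symmetric edge relation of the input
def pvERel (edges : List (List Int)) (u v : Int) : Prop :=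
  ∃ e ∈ edges, e = [u, v] ∨ e = [v, u]

inductive pvConn (g : PySem.Dict Int (List Int)) : Int → Int → Prop
  | refl (u : Int) : pvConn g u u
  | tail {u v w : Int} : pvConn g u v → w ∈ g.getD v [] → pvConn g u w

def pvClosed (g : PySem.Dict Int (List Int)) : Prop :=
  ∀ u v, v ∈ g.getD u [] → v ∈ g.keys

-- A's reachability-under-visited predicate (from the earlier development)
inductive pvReach (g : PySem.Dict Int (List Int)) (V : Int → Prop) : List Int → Int → Prop
  | base {q : List Int} {v : Int} : v ∈ q → pvReach g V q v
  | step {q : List Int} {u v : Int} : pvReach g V q u → v ∈ g.getD u [] → ¬ V v → pvReach g V q v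

theorem pvConn_trans {g : PySem.Dict Int (List Int)} {u v w : Int}
    (h1 : pvConn g u v) (h2 : pvConn g v w) : pvConn g u w := by
  induction h2 with
  | refl => exact h1
  | tail _ hadj ih => exact pvConn.tail ih hadj

theorem pvAdjFold_mem (es : List (List Int)) :
    ∀ (d : PySem.Dict Int (List Int)) (v w : Int), (∀ e ∈ es, e.length = 2) →
    (w ∈ (es.foldl pvAdjStepA d).getD v [] ↔ w ∈ d.getD v [] ∨ pvERel es v w) := by
  induction es with
  | nil => intro d v w _; simp [pvERel]
  | cons e rest ih =>
    intro d v w hpre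
    obtain ⟨a, b, rfl⟩ : ∃ a b, e = [a, b] := by
      match e, hpre e (by simp) with
      | [a, b], _ => exact ⟨a, b, rfl⟩
    rw [List.foldl_cons, ih _ v w (fun e he => hpre e (by simp [he]))]
    have hstep : w ∈ (pvAdjStepA d [a, b]).getD v []
        ↔ w ∈ d.getD v [] ∨ ((v = a ∧ w = b) ∨ (v = b ∧ w = a)) := by
      simp only [pvAdjStepA]
      rw [PySem.Dict.getD_insert]
      by_cases hvb : v = b
      · subst hvb; rw [if_pos rfl, PySem.Dict.getD_insert]
        by_cases hva : v = a
        · subst hva; rw [if_pos rfl]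
          simp only [List.mem_append, List.mem_singleton]; tauto
        · rw [if_neg hva]
          simp only [List.mem_append, List.mem_singleton]; tauto
      · rw [if_neg hvb, PySem.Dict.getD_insert]
        by_cases hva : v = a
        · subst hva; rw [if_pos rfl]
          simp only [List.mem_append, List.mem_singleton]; tauto
        · rw [if_neg hva]; tauto
    rw [hstep]
    have hrel : pvERel ([a,b] :: rest) v w
        ↔ ((v = a ∧ w = b) ∨ (v = b ∧ w = a)) ∨ pvERel rest v w := by
      simp only [pvERel, List.mem_cons]
      constructor
      · rintro ⟨e, he, h2⟩
        rcases he with rfl | he'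
        · simp only [List.cons.injEq, and_true] at h2
          obtain ⟨rfl, rfl⟩ | ⟨rfl, rfl⟩ := h2 <;> tauto
        · exact Or.inr ⟨e, he', h2⟩
      · rintro (⟨⟨rfl, rfl⟩ | ⟨rfl, rfl⟩⟩ | ⟨e, he, h2⟩)
        · exact ⟨[v, w], Or.inl rfl, Or.inl rfl⟩
        · exact ⟨[w, v], Or.inl rfl, Or.inr rfl⟩
        · exact ⟨e, Or.inr he, h2⟩
    rw [hrel]; tauto

theorem pvEnsure_getD (ns : List Int) :
    ∀ (d : PySem.Dict Int (List Int)) (u : Int),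
    (ns.foldl (fun g n => if g.contains n then g else g.insert n []) d).getD u [] = d.getD u [] := by
  induction ns with
  | nil => intro d u; rfl
  | cons n rest ih =>
    intro d u
    rw [List.foldl_cons]
    cases hc : d.contains n with
    | true => simp only [if_true]; exact ih d u
    | false =>
      simp only [Bool.false_eq_true, if_false]
      rw [ih]
      rw [PySem.Dict.getD_insert]
      by_cases hu : u = n
      · subst hu; rw [if_pos rfl, PySem.Dict.getD_of_not_contains _ _ hc]
      · rw [if_neg hu]

theorem adjA_mem (nodes : List Int) (edges : List (List Int))
    (hpre : ∀ e ∈ edges, e.length = 2) (v w : Int) :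
    w ∈ (pvGraphA nodes edges).getD v [] ↔ pvERel edges v w := by
  unfold pvGraphA
  rw [pvEnsure_getD, pvAdjFold_mem edges _ v w hpre]
  simp [PySem.Dict.getD_empty]


theorem pvERel_symm {edges : List (List Int)} {u v : Int}
    (h : pvERel edges u v) : pvERel edges v u := by
  obtain ⟨e, he, h2⟩ := h
  exact ⟨e, he, h2.symm⟩

theorem pvConn_symm {nodes : List Int} {edges : List (List Int)}
    (hpre : ∀ e ∈ edges, e.length = 2) {u v : Int}
    (h : pvConn (pvGraphA nodes edges) u v) : pvConn (pvGraphA nodes edges) v u := by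
  induction h with
  | refl => exact pvConn.refl _
  | tail _ hadj ih =>
    rename_i x y _hprev
    refine pvConn_trans (g := pvGraphA nodes edges) ?_ ih
    refine pvConn.tail (pvConn.refl y) ?_
    rw [adjA_mem nodes edges hpre] at hadj ⊢
    exact pvERel_symm hadj

theorem pvConn_iff_eqvGen (nodes : List Int) (edges : List (List Int))
    (hpre : ∀ e ∈ edges, e.length = 2) (u v : Int) :
    pvConn (pvGraphA nodes edges) u v ↔ Relation.EqvGen (pvERel edges) u v := by
  constructor
  · intro h
    induction h with
    | refl => exact Relation.EqvGen.refl _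
    | tail _ hadj ih =>
      refine Relation.EqvGen.trans _ _ _ ih (Relation.EqvGen.rel _ _ ?_)
      rw [adjA_mem nodes edges hpre] at hadj
      exact hadj
  · intro h
    induction h with
    | rel x y hr =>
      exact pvConn.tail (pvConn.refl x) ((adjA_mem nodes edges hpre x y).2 hr)
    | refl x => exact pvConn.refl x
    | symm x y _ ih => exact pvConn_symm hpre ih
    | trans x y z _ _ ih1 ih2 => exact pvConn_trans ih1 ih2

-- ---- A's BFS loop: fuel accounting and characterization of visited/comp ----

lemma pvFilterDec {keys : List Int} {visited : PySem.Set Int} {v : Int}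
    (hk : v ∈ keys) (hv : PySem.Set.contains visited v = false) :
    (keys.filter (fun k => !(PySem.Set.contains (PySem.Set.add visited v) k))).length + 1
      ≤ (keys.filter (fun k => !(PySem.Set.contains visited k))).length := by
  have hv' : v ∉ visited := by simpa using hv
  have hpred : ∀ k : Int, (!(PySem.Set.contains (PySem.Set.add visited v) k))
      = ((k != v) && (!(PySem.Set.contains visited k))) := by
    intro k
    by_cases hkv : k = v <;> by_cases hkm : k ∈ visited <;>
      simp [hkv, hkm, PySem.Set.add_of_not_mem hv']
  have hrw : keys.filter (fun k => !(PySem.Set.contains (PySem.Set.add visited v) k))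
      = (keys.filter (fun k => !(PySem.Set.contains visited k))).filter (fun k => k != v) := by
    rw [List.filter_filter]
    exact List.filter_congr (fun k _ => hpred k)
  rw [hrw]
  have hmem : v ∈ keys.filter (fun k => !(PySem.Set.contains visited k)) :=
    List.mem_filter.2 ⟨hk, by simpa using hv'⟩
  have := List.length_filter_lt_length_iff_exists.mpr
    (⟨v, hmem, by simp⟩ : ∃ x ∈ keys.filter (fun k => !(PySem.Set.contains visited k)), ¬((fun k => k != v) x = true))
  omega

-- the inner 'for v in graph[u]' scan of A's BFS
def pvScanA (adjl : List Int) (s : PySem.Set Int × List Int) : PySem.Set Int × List Int :=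
  adjl.foldl (fun s v => if PySem.Set.contains s.1 v then s else (PySem.Set.add s.1 v, s.2 ++ [v])) s

lemma pvScanA_spec (keys : List Int) :
    ∀ (adjl : List Int), (∀ v ∈ adjl, v ∈ keys) →
    ∀ (visited : PySem.Set Int) (q0 : List Int), q0.Nodup → (∀ x ∈ q0, x ∈ visited) →
    (∀ x, x ∈ (pvScanA adjl (visited, q0)).1 ↔ x ∈ visited ∨ x ∈ adjl) ∧
    (∀ x, x ∈ (pvScanA adjl (visited, q0)).2 ↔ x ∈ q0 ∨ (x ∈ adjl ∧ x ∉ visited)) ∧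
    (pvScanA adjl (visited, q0)).2.Nodup ∧
    (∀ x ∈ (pvScanA adjl (visited, q0)).2, x ∈ (pvScanA adjl (visited, q0)).1) ∧
    ((keys.filter (fun k => !(PySem.Set.contains (pvScanA adjl (visited, q0)).1 k))).length
        + (pvScanA adjl (visited, q0)).2.length
      ≤ (keys.filter (fun k => !(PySem.Set.contains visited k))).length + q0.length) := by
  intro adjl
  induction adjl with
  | nil =>
    intro _ visited q0 hnd0 hsub
    refine ⟨by simp [pvScanA], by simp [pvScanA], by simpa [pvScanA] using hnd0,
      by simpa [pvScanA] using hsub, by simp [pvScanA]⟩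
  | cons v rest ih =>
    intro hadj visited q0 hnd0 hsub
    have hvk : v ∈ keys := hadj v (by simp)
    have hrk : ∀ w ∈ rest, w ∈ keys := fun w hw => hadj w (by simp [hw])
    by_cases hcv : v ∈ visited
    · have hc : PySem.Set.contains visited v = true := by simpa using hcv
      have hstep : pvScanA (v :: rest) (visited, q0) = pvScanA rest (visited, q0) := by
        simp [pvScanA, hcv]
      obtain ⟨h1, h2, h3, h4, h5⟩ := ih hrk visited q0 hnd0 hsub
      rw [hstep]
      refine ⟨?_, ?_, h3, h4, by omega⟩
      · intro x
        rw [h1 x]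
        constructor
        · rintro (h | h)
          · exact Or.inl h
          · exact Or.inr (by simp [h])
        · rintro (h | h)
          · exact Or.inl h
          · rcases List.mem_cons.1 h with h | h
            · exact Or.inl (h ▸ hcv)
            · exact Or.inr h
      · intro x
        rw [h2 x]
        constructor
        · rintro (h | ⟨h, h'⟩)
          · exact Or.inl h
          · exact Or.inr ⟨by simp [h], h'⟩
        · rintro (h | ⟨h, h'⟩)
          · exact Or.inl h
          · rcases List.mem_cons.1 h with h | h
            · exact absurd (h ▸ hcv) h'
            · exact Or.inr ⟨h, h'⟩
    · have hc : PySem.Set.contains visited v = false := by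
        cases h : PySem.Set.contains visited v
        · rfl
        · exact absurd (by simpa using h) hcv
      have hstep : pvScanA (v :: rest) (visited, q0)
          = pvScanA rest (PySem.Set.add visited v, q0 ++ [v]) := by
        simp [pvScanA, hcv]
      have hvq0 : v ∉ q0 := fun h => hcv (hsub v h)
      have hndq' : (q0 ++ [v]).Nodup := by
        simp only [List.nodup_append, List.nodup_singleton, true_and]
        refine ⟨hnd0, ?_⟩
        intro a ha b hb
        rw [List.mem_singleton] at hb
        subst hb
        exact fun he => hvq0 (he ▸ ha)
      have hsub' : ∀ x ∈ q0 ++ [v], x ∈ PySem.Set.add visited v := by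
        intro x hx
        rcases List.mem_append.1 hx with h | h
        · exact (PySem.Set.mem_add _ _ _).2 (Or.inl (hsub x h))
        · exact (PySem.Set.mem_add _ _ _).2 (Or.inr (List.mem_singleton.1 h))
      obtain ⟨h1, h2, h3, h4, h5⟩ := ih hrk (PySem.Set.add visited v) (q0 ++ [v]) hndq' hsub'
      rw [hstep]
      have hdec := pvFilterDec (keys := keys) hvk hc
      have hplen : (q0 ++ [v]).length = q0.length + 1 := by simp
      refine ⟨?_, ?_, h3, h4, by omega⟩
      · intro x
        rw [h1 x, PySem.Set.mem_add]
        constructor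
        · rintro ((h | h) | h)
          · exact Or.inl h
          · exact Or.inr (by simp [h])
          · exact Or.inr (by simp [h])
        · rintro (h | h)
          · exact Or.inl (Or.inl h)
          · rcases List.mem_cons.1 h with h | h
            · exact Or.inl (Or.inr h)
            · exact Or.inr h
      · intro x
        rw [h2 x]
        simp only [List.mem_append, List.mem_singleton, PySem.Set.mem_add]
        constructor
        · rintro ((h | h) | ⟨h, h'⟩)
          · exact Or.inl h
          · exact Or.inr ⟨by simp [h], h ▸ hcv⟩
          · exact Or.inr ⟨by simp [h], fun hm => h' (Or.inl hm)⟩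
        · rintro (h | ⟨h, h'⟩)
          · exact Or.inl (Or.inl h)
          · rcases List.mem_cons.1 h with h | h
            · exact Or.inl (Or.inr h)
            · by_cases hxv : x = v
              · exact Or.inl (Or.inr hxv)
              · exact Or.inr ⟨h, fun hor => by rcases hor with hm | he; exact h' hm; exact hxv he⟩

lemma pvReachTransfer {g : PySem.Dict Int (List Int)} {V V' : Int → Prop}
    {u : Int} {qs q' : List Int}
    (hVu : V u)
    (hV' : ∀ x, V' x ↔ V x ∨ x ∈ g.getD u [])
    (hq' : ∀ x, x ∈ q' ↔ x ∈ qs ∨ (x ∈ g.getD u [] ∧ ¬ V x)) :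
    ∀ x, pvReach g V (u :: qs) x ↔ x = u ∨ pvReach g V' q' x := by
  intro x
  constructor
  · intro h
    induction h with
    | base hb =>
      rcases List.mem_cons.1 hb with h | h
      · exact Or.inl h
      · exact Or.inr (pvReach.base ((hq' _).2 (Or.inl h)))
    | step h hadj hnv ih =>
      rename_i w y
      rcases ih with rfl | hr
      · exact Or.inr (pvReach.base ((hq' _).2 (Or.inr ⟨hadj, hnv⟩)))
      · by_cases hV'x : V' y
        · rcases (hV' _).1 hV'x with h | h
          · exact absurd h hnv
          · exact Or.inr (pvReach.base ((hq' _).2 (Or.inr ⟨h, hnv⟩)))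
        · exact Or.inr (pvReach.step hr hadj hV'x)
  · rintro (rfl | h)
    · exact pvReach.base (by simp)
    · induction h with
      | base hb =>
        rcases (hq' _).1 hb with h | ⟨h1, h2⟩
        · exact pvReach.base (by simp [h])
        · exact pvReach.step (pvReach.base (by simp)) h1 h2
      | step h hadj hnv ih =>
        exact pvReach.step ih hadj (fun hv => hnv ((hV' _).2 (Or.inl hv)))

lemma pvReach_nil {g : PySem.Dict Int (List Int)} {V : Int → Prop} {x : Int}
    (h : pvReach g V [] x) : False := by
  induction h with
  | base hb => simp at hb
  | step _ _ _ ih => exact ih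

lemma pvBFSA_spec {g : PySem.Dict Int (List Int)} (hc : pvClosed g) :
    ∀ (fuel : Nat) (visited : PySem.Set Int) (q comp : List Int),
    q.Nodup → (∀ x ∈ q, x ∈ visited) → (∀ x ∈ comp, x ∈ visited) →
    (∀ x ∈ q, x ∉ comp) → comp.Nodup →
    (g.keys.filter (fun k => !(PySem.Set.contains visited k))).length + q.length ≤ fuel →
    (∀ x, ((x ∈ (pvBFSA g fuel visited q comp).1 ↔ x ∈ visited ∨ pvReach g (· ∈ visited) q x)
       ∧ (x ∈ (pvBFSA g fuel visited q comp).2 ↔ x ∈ comp ∨ pvReach g (· ∈ visited) q x)))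
      ∧ (pvBFSA g fuel visited q comp).2.Nodup := by
  intro fuel
  induction fuel with
  | zero =>
    intro visited q comp hqnd hqv hcv hqc hcnd hfuel
    have hq : q = [] := List.length_eq_zero_iff.1 (by omega)
    subst hq
    refine ⟨fun x => ⟨?_, ?_⟩, by simpa [pvBFSA] using hcnd⟩
    · simp only [pvBFSA]
      exact ⟨fun h => Or.inl h, fun h => by
        rcases h with h | h
        · exact h
        · exact absurd h (fun hr => pvReach_nil hr)⟩
    · simp only [pvBFSA]
      exact ⟨fun h => Or.inl h, fun h => by
        rcases h with h | h
        · exact h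
        · exact absurd h (fun hr => pvReach_nil hr)⟩
  | succ fuel ih =>
    intro visited q comp hqnd hqv hcv hqc hcnd hfuel
    match q with
    | [] =>
      refine ⟨fun x => ⟨?_, ?_⟩, by simpa [pvBFSA] using hcnd⟩
      · simp only [pvBFSA]
        exact ⟨fun h => Or.inl h, fun h => by
          rcases h with h | h
          · exact h
          · exact absurd h (fun hr => pvReach_nil hr)⟩
      · simp only [pvBFSA]
        exact ⟨fun h => Or.inl h, fun h => by
          rcases h with h | h
          · exact h
          · exact absurd h (fun hr => pvReach_nil hr)⟩
    | u :: qs =>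
      have hstep : pvBFSA g (fuel+1) visited (u :: qs) comp
          = pvBFSA g fuel (pvScanA (g.getD u []) (visited, qs)).1
              (pvScanA (g.getD u []) (visited, qs)).2 (comp ++ [u]) := rfl
      have hadjk : ∀ v ∈ g.getD u [], v ∈ g.keys := fun v hv => hc u v hv
      have hqsnd : qs.Nodup := (List.nodup_cons.1 hqnd).2
      have huqs : u ∉ qs := (List.nodup_cons.1 hqnd).1
      have hqsv : ∀ x ∈ qs, x ∈ visited := fun x hx => hqv x (by simp [hx])
      have huv : u ∈ visited := hqv u (by simp)
      obtain ⟨h1, h2, h3, h4, h5⟩ := pvScanA_spec g.keys (g.getD u []) hadjk visited qs hqsnd hqsv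
      set S := pvScanA (g.getD u []) (visited, qs) with hS
      have htrans := pvReachTransfer (g := g) (V := (· ∈ visited)) (V' := (· ∈ S.1))
        (u := u) (qs := qs) (q' := S.2) huv h1 h2
      have hcv' : ∀ x ∈ comp ++ [u], x ∈ S.1 := by
        intro x hx
        rcases List.mem_append.1 hx with h | h
        · exact (h1 x).2 (Or.inl (hcv x h))
        · exact (h1 x).2 (Or.inl (by simpa using (List.mem_singleton.1 h) ▸ huv))
      have hqc' : ∀ x ∈ S.2, x ∉ comp ++ [u] := by
        intro x hx hmm
        rcases (h2 x).1 hx with h | ⟨_, h'⟩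
        · rcases List.mem_append.1 hmm with hm | hm
          · exact hqc x (by simp [h]) hm
          · exact huqs ((List.mem_singleton.1 hm) ▸ h)
        · rcases List.mem_append.1 hmm with hm | hm
          · exact h' (hcv x hm)
          · exact h' ((List.mem_singleton.1 hm) ▸ huv)
      have hcnd' : (comp ++ [u]).Nodup := by
        have hu : u ∉ comp := hqc u (by simp)
        simp only [List.nodup_append, List.nodup_singleton, true_and]
        refine ⟨hcnd, ?_⟩
        intro a ha b hb
        rw [List.mem_singleton] at hb
        subst hb
        exact fun he => hu (he ▸ ha)
      have hfuel' : (g.keys.filter (fun k => !(PySem.Set.contains S.1 k))).length + S.2.length ≤ fuel := by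
        have hlen2 : (u :: qs).length = qs.length + 1 := by simp
        omega
      obtain ⟨hIH, hIHnd⟩ := ih S.1 S.2 (comp ++ [u]) h3 h4 hcv' hqc' hcnd' hfuel'
      rw [hstep]
      refine ⟨fun x => ⟨?_, ?_⟩, hIHnd⟩
      · rw [(hIH x).1]
        constructor
        · rintro (h | h)
          · rcases (h1 x).1 h with h | h
            · exact Or.inl h
            · by_cases hxv : x ∈ visited
              · exact Or.inl hxv
              · exact Or.inr (pvReach.step (pvReach.base (by simp)) h hxv)
          · exact Or.inr ((htrans x).2 (Or.inr h))
        · rintro (h | h)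
          · exact Or.inl ((h1 x).2 (Or.inl h))
          · rcases (htrans x).1 h with rfl | h
            · exact Or.inl ((h1 x).2 (Or.inl huv))
            · exact Or.inr h
      · rw [(hIH x).2]
        constructor
        · rintro (h | h)
          · rcases List.mem_append.1 h with h | h
            · exact Or.inl h
            · exact Or.inr ((htrans x).2 (Or.inl (List.mem_singleton.1 h)))
          · exact Or.inr ((htrans x).2 (Or.inr h))
        · rintro (h | h)
          · exact Or.inl (by simp [h])
          · rcases (htrans x).1 h with rfl | h
            · exact Or.inl (by simp)
            · exact Or.inr h

lemma pvClosed_graphA (nodes : List Int) (edges : List (List Int)) :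
    pvClosed (pvGraphA nodes edges) := by
  have hmono : ∀ (d : PySem.Dict Int (List Int)) (k : Int) (v : List Int) (x : Int),
      x ∈ d.keys → x ∈ (d.insert k v).keys :=
    fun d k v x hx => (PySem.Dict.mem_keys_insert d k x v).2 (Or.inr hx)
  have hstep : ∀ (d : PySem.Dict Int (List Int)), pvClosed d → ∀ e, pvClosed (pvAdjStepA d e) := by
    intro d hd e
    cases e with
    | nil => exact hd
    | cons a tl =>
      cases tl with
      | nil => exact hd
      | cons b tl2 =>
        intro u v hv
        simp only [pvAdjStepA] at hv ⊢
        rw [PySem.Dict.getD_insert] at hv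
        by_cases hub : u = b
        · rw [if_pos hub] at hv
          rcases List.mem_append.1 hv with h | h
          · rw [PySem.Dict.getD_insert] at h
            by_cases hba : b = a
            · rw [if_pos hba] at h
              rcases List.mem_append.1 h with h' | h'
              · exact hmono _ _ _ _ (hmono _ _ _ _ (hd a v h'))
              · exact hmono _ _ _ _ ((PySem.Dict.mem_keys_insert d a v _).2
                  (Or.inl (by rw [List.mem_singleton.1 h']; exact hba)))
            · rw [if_neg hba] at h
              exact hmono _ _ _ _ (hmono _ _ _ _ (hd b v h))
          · exact hmono _ _ _ _ ((PySem.Dict.mem_keys_insert d a v _).2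
              (Or.inl (List.mem_singleton.1 h)))
        · rw [if_neg hub] at hv
          rw [PySem.Dict.getD_insert] at hv
          by_cases hua : u = a
          · rw [if_pos hua] at hv
            rcases List.mem_append.1 hv with h | h
            · exact hmono _ _ _ _ (hmono _ _ _ _ (hd a v h))
            · exact (PySem.Dict.mem_keys_insert _ b v _).2 (Or.inl (List.mem_singleton.1 h))
          · rw [if_neg hua] at hv
            exact hmono _ _ _ _ (hmono _ _ _ _ (hd u v hv))
  have hens : ∀ (d : PySem.Dict Int (List Int)), pvClosed d → ∀ (n : Int),
      pvClosed (if d.contains n then d else d.insert n []) := by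
    intro d hd n
    cases h : d.contains n
    · simp only [Bool.false_eq_true, if_false]
      intro u v hv
      rw [PySem.Dict.getD_insert] at hv
      by_cases hun : u = n
      · rw [if_pos hun] at hv; simp at hv
      · rw [if_neg hun] at hv
        exact hmono _ _ _ _ (hd u v hv)
    · simpa using hd
  have hfold : ∀ (l : List (List Int)) (d : PySem.Dict Int (List Int)), pvClosed d →
      pvClosed (l.foldl pvAdjStepA d) := by
    intro l
    induction l with
    | nil => intro d hd; exact hd
    | cons e t ih => intro d hd; exact ih _ (hstep d hd e)
  have hfold2 : ∀ (l : List Int) (d : PySem.Dict Int (List Int)), pvClosed d →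
      pvClosed (l.foldl (fun g n => if g.contains n then g else g.insert n []) d) := by
    intro l
    induction l with
    | nil => intro d hd; exact hd
    | cons n t ih => intro d hd; exact ih _ (hens d hd n)
  have hempty : pvClosed (PySem.Dict.empty : PySem.Dict Int (List Int)) := by
    intro u v hv
    rw [PySem.Dict.getD_empty] at hv
    simp at hv
  exact hfold2 nodes _ (hfold edges _ hempty)

-- ---- keys of A's graph ----

lemma pvKeysMono (ns : List Int) :
    ∀ (d : PySem.Dict Int (List Int)) (x : Int), x ∈ d.keys →
    x ∈ (ns.foldl (fun g n => if g.contains n then g else g.insert n []) d).keys := by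
  induction ns with
  | nil => intro d x hx; exact hx
  | cons n rest ih =>
    intro d x hx
    rw [List.foldl_cons]
    cases hc : d.contains n
    · simp only [Bool.false_eq_true, if_false]
      exact ih _ x ((PySem.Dict.mem_keys_insert d n x []).2 (Or.inr hx))
    · simp only [if_true]
      exact ih _ x hx

lemma pvNodesFold_mem (ns : List Int) :
    ∀ (d : PySem.Dict Int (List Int)) (n : Int), n ∈ ns →
    n ∈ (ns.foldl (fun g n => if g.contains n then g else g.insert n []) d).keys := by
  induction ns with
  | nil => intro d n hn; simp at hn
  | cons m rest ih =>
    intro d n hn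
    rw [List.foldl_cons]
    rcases List.mem_cons.1 hn with rfl | hn'
    · cases hc : d.contains n
      · simp only [Bool.false_eq_true, if_false]
        exact pvKeysMono rest _ n ((PySem.Dict.mem_keys_insert d n n []).2 (Or.inl rfl))
      · simp only [if_true]
        exact pvKeysMono rest _ n (by
          have h := PySem.Dict.contains_eq_decide_mem_keys d n
          rw [hc] at h
          exact of_decide_eq_true h.symm)
    · exact ih _ n hn'

lemma pvNodes_mem_keysA (nodes : List Int) (edges : List (List Int)) :
    ∀ n ∈ nodes, n ∈ (pvGraphA nodes edges).keys := by
  intro n hn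
  exact pvNodesFold_mem nodes _ n hn

lemma pvGraphA_keys_nodup (nodes : List Int) (edges : List (List Int)) :
    (pvGraphA nodes edges).keys.Nodup := by
  unfold pvGraphA
  have hstep : ∀ (d : PySem.Dict Int (List Int)), d.keys.Nodup → ∀ e, (pvAdjStepA d e).keys.Nodup := by
    intro d hd e
    cases e with
    | nil => exact hd
    | cons a tl =>
      cases tl with
      | nil => exact hd
      | cons b tl2 =>
        exact PySem.Dict.nodup_keys_insert _ _ _ (PySem.Dict.nodup_keys_insert _ _ _ hd)
  have h1 : ∀ (l : List (List Int)) (d : PySem.Dict Int (List Int)), d.keys.Nodup →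
      (l.foldl pvAdjStepA d).keys.Nodup := by
    intro l
    induction l with
    | nil => intro d hd; exact hd
    | cons e t ih => intro d hd; exact ih _ (hstep d hd e)
  have h2 : ∀ (l : List Int) (d : PySem.Dict Int (List Int)), d.keys.Nodup →
      (l.foldl (fun g n => if g.contains n then g else g.insert n []) d).keys.Nodup := by
    intro l
    induction l with
    | nil => intro d hd; exact hd
    | cons n t ih =>
      intro d hd
      rw [List.foldl_cons]
      cases hc : d.contains n
      · simp only [Bool.false_eq_true, if_false]
        exact ih _ (PySem.Dict.nodup_keys_insert _ _ _ hd)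
      · simp only [if_true]
        exact ih _ hd
  exact h2 nodes _ (h1 edges _ (by simp))

lemma pvConn_mem_keys {g : PySem.Dict Int (List Int)} (hc : pvClosed g) {u v : Int}
    (h : pvConn g u v) (hu : u ∈ g.keys) : v ∈ g.keys := by
  induction h with
  | refl => exact hu
  | tail _ hadj _ => exact hc _ _ hadj

lemma pvEdge_endpoints_mem_keysA (nodes : List Int) (edges : List (List Int))
    (hpre : ∀ e ∈ edges, e.length = 2) {a b : Int} (he : [a, b] ∈ edges) :
    a ∈ (pvGraphA nodes edges).keys ∧ b ∈ (pvGraphA nodes edges).keys := by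
  have hb : b ∈ (pvGraphA nodes edges).getD a [] :=
    (adjA_mem nodes edges hpre a b).2 ⟨[a, b], he, Or.inl rfl⟩
  have ha : a ∈ (pvGraphA nodes edges).getD b [] :=
    (adjA_mem nodes edges hpre b a).2 ⟨[a, b], he, Or.inr rfl⟩
  exact ⟨pvClosed_graphA nodes edges b a ha, pvClosed_graphA nodes edges a b hb⟩

-- ---- reach (under a component-closed visited set) is plain connectivity ----

lemma pvConn_notin (nodes : List Int) (edges : List (List Int))
    (hpre : ∀ e ∈ edges, e.length = 2) (visited : PySem.Set Int)
    (hclosed : ∀ x ∈ visited, ∀ y ∈ (pvGraphA nodes edges).getD x [], y ∈ visited)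
    {start x : Int} (hs : start ∉ visited)
    (h : pvConn (pvGraphA nodes edges) start x) : x ∉ visited := by
  induction h with
  | refl => exact hs
  | tail _ hadj ih =>
    rename_i v w _hprev
    intro hwv
    have hvw : v ∈ (pvGraphA nodes edges).getD w [] := by
      rw [adjA_mem nodes edges hpre] at hadj ⊢
      exact pvERel_symm hadj
    exact ih (hclosed w hwv v hvw)

lemma pvReach_iff_conn (nodes : List Int) (edges : List (List Int))
    (hpre : ∀ e ∈ edges, e.length = 2) (visited : PySem.Set Int)
    (hclosed : ∀ x ∈ visited, ∀ y ∈ (pvGraphA nodes edges).getD x [], y ∈ visited)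
    (start : Int) (hs : start ∉ visited) (x : Int) :
    pvReach (pvGraphA nodes edges) (· ∈ PySem.Set.add visited start) [start] x
      ↔ pvConn (pvGraphA nodes edges) start x := by
  constructor
  · intro h
    induction h with
    | base hb =>
      rw [List.mem_singleton] at hb
      subst hb
      exact pvConn.refl _
    | step _ hadj _ ih => exact pvConn.tail ih hadj
  · intro h
    induction h with
    | refl => exact pvReach.base (by simp)
    | tail hprev hadj ih =>
      rename_i v w
      have hw : w ∉ visited :=
        pvConn_notin nodes edges hpre visited hclosed hs (pvConn.tail hprev hadj)
      by_cases hws : w = start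
      · exact pvReach.base (by simp [hws])
      · refine pvReach.step ih hadj ?_
        intro hmem
        rcases (PySem.Set.mem_add _ _ _).1 hmem with hm | hm
        · exact hw hm
        · exact hws hm

-- ---- B's degree dict equals A's adjacency lengths ----

lemma pvKeys_par_insert {ν₁ ν₂ : Type} (d : PySem.Dict Int ν₁) (e : PySem.Dict Int ν₂)
    (k : Int) (v1 : ν₁) (v2 : ν₂) (h : d.keys = e.keys) :
    (d.insert k v1).keys = (e.insert k v2).keys := by
  have hc : d.contains k = e.contains k := by
    rw [PySem.Dict.contains_eq_decide_mem_keys, PySem.Dict.contains_eq_decide_mem_keys, h]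
  cases hck : d.contains k
  · rw [PySem.Dict.keys_insert_of_not_contains _ _ hck,
      PySem.Dict.keys_insert_of_not_contains _ _ (hc ▸ hck), h]
  · rw [PySem.Dict.keys_insert_of_contains _ _ hck,
      PySem.Dict.keys_insert_of_contains _ _ (hc ▸ hck), h]

lemma pvDeg_spec (nodes : List Int) (edges : List (List Int)) :
    (pvDeg nodes edges).keys = (pvGraphA nodes edges).keys ∧
    ∀ u, (pvDeg nodes edges).getD u 0 = (((pvGraphA nodes edges).getD u []).length : Int) := by
  unfold pvDeg pvGraphA
  have hedges : ∀ (es : List (List Int)) (d : PySem.Dict Int Int) (gr : PySem.Dict Int (List Int)),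
      d.keys = gr.keys → (∀ u, d.getD u 0 = ((gr.getD u []).length : Int)) →
      (es.foldl pvDegStep d).keys = (es.foldl pvAdjStepA gr).keys ∧
      ∀ u, (es.foldl pvDegStep d).getD u 0 = (((es.foldl pvAdjStepA gr).getD u []).length : Int) := by
    intro es
    induction es with
    | nil => intro d gr hk hv; exact ⟨hk, hv⟩
    | cons e rest ih =>
      intro d gr hk hv
      rw [List.foldl_cons, List.foldl_cons]
      refine ih _ _ ?_ ?_
      · cases e with
        | nil => exact hk
        | cons a tl =>
          cases tl with
          | nil => exact hk
          | cons b tl2 =>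
            exact pvKeys_par_insert _ _ b _ _ (pvKeys_par_insert _ _ a _ _ hk)
      · cases e with
        | nil => exact hv
        | cons a tl =>
          cases tl with
          | nil => exact hv
          | cons b tl2 =>
            intro u
            simp only [pvDegStep, pvAdjStepA, PySem.Dict.getD_insert]
            split_ifs <;> simp [hv] <;> omega
  have hnodes : ∀ (ns : List Int) (d : PySem.Dict Int Int) (gr : PySem.Dict Int (List Int)),
      d.keys = gr.keys → (∀ u, d.getD u 0 = ((gr.getD u []).length : Int)) →
      (ns.foldl (fun d n => d.setdefault n 0) d).keys
        = (ns.foldl (fun g n => if g.contains n then g else g.insert n []) gr).keys ∧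
      ∀ u, (ns.foldl (fun d n => d.setdefault n 0) d).getD u 0
        = (((ns.foldl (fun g n => if g.contains n then g else g.insert n []) gr).getD u []).length : Int) := by
    intro ns
    induction ns with
    | nil => intro d gr hk hv; exact ⟨hk, hv⟩
    | cons n rest ih =>
      intro d gr hk hv
      rw [List.foldl_cons, List.foldl_cons]
      have hc : d.contains n = gr.contains n := by
        rw [PySem.Dict.contains_eq_decide_mem_keys, PySem.Dict.contains_eq_decide_mem_keys, hk]
      cases hck : gr.contains n
      · rw [PySem.Dict.setdefault_of_not_contains _ _ (hc.trans hck)]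
        simp only [Bool.false_eq_true, if_false]
        refine ih _ _ (pvKeys_par_insert _ _ n _ _ hk) ?_
        intro u
        rw [PySem.Dict.getD_insert, PySem.Dict.getD_insert]
        split_ifs
        · simp
        · exact hv u
      · rw [PySem.Dict.setdefault_of_contains _ _ (hc.trans hck)]
        simp only [if_true]
        exact ih _ _ hk hv
  obtain ⟨hk, hv⟩ := hedges edges PySem.Dict.empty PySem.Dict.empty (by simp) (by
    intro u
    rw [PySem.Dict.getD_empty, PySem.Dict.getD_empty]
    simp)
  exact hnodes nodes _ _ hk hv

-- ---- B's label table: initialization, relabelling scan, and its meaning ----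

lemma pvLabelInit_spec (ks : List Int) :
    ∀ (L : PySem.Dict Int Int), L.keys.Nodup →
    ((∀ x, x ∈ (ks.foldl (fun L v => L.insert v v) L).keys ↔ x ∈ L.keys ∨ x ∈ ks) ∧
     (ks.foldl (fun L v => L.insert v v) L).keys.Nodup ∧
     (∀ u, (ks.foldl (fun L v => L.insert v v) L).getD u 0
        = if u ∈ ks then u else L.getD u 0)) := by
  induction ks with
  | nil => intro L hnd; exact ⟨by simp, hnd, by simp⟩
  | cons v rest ih =>
    intro L hnd
    rw [List.foldl_cons]
    obtain ⟨h1, h2, h3⟩ := ih (L.insert v v) (PySem.Dict.nodup_keys_insert _ _ _ hnd)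
    refine ⟨?_, h2, ?_⟩
    · intro x
      rw [h1 x, PySem.Dict.mem_keys_insert]
      simp only [List.mem_cons]
      tauto
    · intro u
      rw [h3 u, PySem.Dict.getD_insert]
      by_cases hur : u ∈ rest
      · simp [hur]
      · by_cases huv : u = v
        · simp [hur, huv]
        · simp [hur, huv]

lemma pvRelabelScan (la lb : Int) (ks : List Int) :
    ∀ (L : PySem.Dict Int Int), ks.Nodup → (∀ v ∈ ks, v ∈ L.keys) →
    ((ks.foldl (fun L' v => if L'.getD v 0 == lb then L'.insert v la else L') L).keys = L.keys ∧
     (∀ u, (ks.foldl (fun L' v => if L'.getD v 0 == lb then L'.insert v la else L') L).getD u 0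
        = if u ∈ ks then (if L.getD u 0 = lb then la else L.getD u 0) else L.getD u 0)) := by
  induction ks with
  | nil => intro L _ _; exact ⟨rfl, by simp⟩
  | cons v rest ih =>
    intro L hnd hsub
    have hvk : v ∈ L.keys := hsub v (by simp)
    have hvrest : v ∉ rest := (List.nodup_cons.1 hnd).1
    rw [List.foldl_cons]
    have hL1keys : (if L.getD v 0 == lb then L.insert v la else L).keys = L.keys := by
      split_ifs
      · exact PySem.Dict.keys_insert_of_contains _ _ (by
          rw [PySem.Dict.contains_eq_decide_mem_keys]
          exact decide_eq_true hvk)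
      · rfl
    have hL1getD : ∀ u, (if L.getD v 0 == lb then L.insert v la else L).getD u 0
        = if u = v then (if L.getD v 0 = lb then la else L.getD v 0) else L.getD u 0 := by
      intro u
      by_cases hlb : L.getD v 0 = lb
      · simp only [hlb, BEq.rfl, if_true]
        rw [PySem.Dict.getD_insert]
      · have : (L.getD v 0 == lb) = false := by
          simpa using hlb
        simp only [this, Bool.false_eq_true, if_false, hlb]
        by_cases huv : u = v
        · simp [huv]
        · simp [huv]
    obtain ⟨hk, hv⟩ := ih (if L.getD v 0 == lb then L.insert v la else L)
      (List.nodup_cons.1 hnd).2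
      (fun w hw => by rw [hL1keys]; exact hsub w (by simp [hw]))
    refine ⟨hk.trans hL1keys, ?_⟩
    intro u
    rw [hv u, hL1getD u]
    by_cases hur : u ∈ rest
    · have huv : u ≠ v := fun he => hvrest (he ▸ hur)
      simp [hur, huv]
    · by_cases huv : u = v
      · subst huv
        simp [hur]
      · simp [hur, huv]

lemma pvEqvGen_congr {r s : Int → Int → Prop} (h : ∀ x y, r x y ↔ s x y) {u v : Int} :
    Relation.EqvGen r u v ↔ Relation.EqvGen s u v :=
  ⟨Relation.EqvGen.mono (fun a b hr => (h a b).1 hr),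
   Relation.EqvGen.mono (fun a b hr => (h a b).2 hr)⟩

lemma pvEqvGen_false {u v : Int} :
    Relation.EqvGen (fun _ _ => False) u v ↔ u = v := by
  constructor
  · intro h
    induction h with
    | rel _ _ hr => exact absurd hr (fun h => h)
    | refl => rfl
    | symm _ _ _ ih => exact ih.symm
    | trans _ _ _ _ _ ih1 ih2 => exact ih1.trans ih2
  · rintro rfl
    exact Relation.EqvGen.refl _

lemma pvEqvGen_join {R : Int → Int → Prop} {a b : Int} {u v : Int} :
    Relation.EqvGen (fun x y => R x y ∨ (x = a ∧ y = b) ∨ (x = b ∧ y = a)) u v ↔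
      (Relation.EqvGen R u v ∨ (Relation.EqvGen R u a ∧ Relation.EqvGen R b v) ∨
        (Relation.EqvGen R u b ∧ Relation.EqvGen R a v)) := by
  constructor
  · intro h
    induction h with
    | rel x y hr =>
      rcases hr with hr | ⟨rfl, rfl⟩ | ⟨rfl, rfl⟩
      · exact Or.inl (Relation.EqvGen.rel _ _ hr)
      · exact Or.inr (Or.inl ⟨Relation.EqvGen.refl _, Relation.EqvGen.refl _⟩)
      · exact Or.inr (Or.inr ⟨Relation.EqvGen.refl _, Relation.EqvGen.refl _⟩)
    | refl x => exact Or.inl (Relation.EqvGen.refl _)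
    | symm x y _ ih =>
      rcases ih with h | ⟨h1, h2⟩ | ⟨h1, h2⟩
      · exact Or.inl (Relation.EqvGen.symm _ _ h)
      · exact Or.inr (Or.inr ⟨Relation.EqvGen.symm _ _ h2, Relation.EqvGen.symm _ _ h1⟩)
      · exact Or.inr (Or.inl ⟨Relation.EqvGen.symm _ _ h2, Relation.EqvGen.symm _ _ h1⟩)
    | trans x y z _ _ ih1 ih2 =>
      rcases ih1 with h | ⟨h1, h2⟩ | ⟨h1, h2⟩ <;> rcases ih2 with h' | ⟨h1', h2'⟩ | ⟨h1', h2'⟩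
      · exact Or.inl (Relation.EqvGen.trans _ _ _ h h')
      · exact Or.inr (Or.inl ⟨Relation.EqvGen.trans _ _ _ h h1', h2'⟩)
      · exact Or.inr (Or.inr ⟨Relation.EqvGen.trans _ _ _ h h1', h2'⟩)
      · exact Or.inr (Or.inl ⟨h1, Relation.EqvGen.trans _ _ _ h2 h'⟩)
      · exact Or.inl (Relation.EqvGen.trans _ _ _
          (Relation.EqvGen.trans _ _ _ h1 (Relation.EqvGen.symm _ _
            (Relation.EqvGen.trans _ _ _ h2 h1'))) h2')
      · exact Or.inl (Relation.EqvGen.trans _ _ _ h1 h2')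
      · exact Or.inr (Or.inr ⟨h1, Relation.EqvGen.trans _ _ _ h2 h'⟩)
      · exact Or.inl (Relation.EqvGen.trans _ _ _ h1 h2')
      · exact Or.inl (Relation.EqvGen.trans _ _ _
          (Relation.EqvGen.trans _ _ _ h1 (Relation.EqvGen.symm _ _
            (Relation.EqvGen.trans _ _ _ h2 h1'))) h2')
  · intro h
    have hmono : ∀ {x y : Int}, Relation.EqvGen R x y →
        Relation.EqvGen (fun x y => R x y ∨ (x = a ∧ y = b) ∨ (x = b ∧ y = a)) x y :=
      fun h => Relation.EqvGen.mono (fun _ _ hr => Or.inl hr) h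
    have hab : Relation.EqvGen (fun x y => R x y ∨ (x = a ∧ y = b) ∨ (x = b ∧ y = a)) a b :=
      Relation.EqvGen.rel _ _ (Or.inr (Or.inl ⟨rfl, rfl⟩))
    rcases h with h | ⟨h1, h2⟩ | ⟨h1, h2⟩
    · exact hmono h
    · exact Relation.EqvGen.trans _ _ _ (Relation.EqvGen.trans _ _ _ (hmono h1) hab) (hmono h2)
    · exact Relation.EqvGen.trans _ _ _
        (Relation.EqvGen.trans _ _ _ (hmono h1) (Relation.EqvGen.symm _ _ hab)) (hmono h2)

lemma pvIteMerge {la lb x y : Int} (hne : la ≠ lb) :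
    ((if x = lb then la else x) = (if y = lb then la else y))
      ↔ (x = y ∨ (x = la ∧ y = lb) ∨ (x = lb ∧ y = la)) := by
  by_cases h1 : x = lb <;> by_cases h2 : y = lb <;>
    simp [h1, h2, Ne.symm hne, eq_comm] <;> tauto

lemma pvLabelFold (es : List (List Int)) :
    ∀ (L : PySem.Dict Int Int) (R : Int → Int → Prop),
    (∀ e ∈ es, e.length = 2) →
    L.keys.Nodup →
    (∀ e ∈ es, ∀ x ∈ e, x ∈ L.keys) →
    (∀ u v, u ∈ L.keys → v ∈ L.keys → (L.getD u 0 = L.getD v 0 ↔ Relation.EqvGen R u v)) →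
    ((es.foldl pvRelabelStep L).keys = L.keys ∧
     ∀ u v, u ∈ L.keys → v ∈ L.keys →
       ((es.foldl pvRelabelStep L).getD u 0 = (es.foldl pvRelabelStep L).getD v 0 ↔
        Relation.EqvGen (fun x y => R x y ∨ pvERel es x y) u v)) := by
  induction es with
  | nil =>
    intro L R _ _ _ hinv
    refine ⟨rfl, fun u v hu hv => ?_⟩
    simp only [List.foldl_nil]
    rw [hinv u v hu hv]
    exact pvEqvGen_congr (fun x y => by simp [pvERel])
  | cons e rest ih =>
    intro L R hpre hnd hkeys hinv
    obtain ⟨a, b, rfl⟩ : ∃ a b, e = [a, b] := by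
      match e, hpre e (by simp) with
      | [a, b], _ => exact ⟨a, b, rfl⟩
    have ha : a ∈ L.keys := hkeys [a, b] (by simp) a (by simp)
    have hb : b ∈ L.keys := hkeys [a, b] (by simp) b (by simp)
    rw [List.foldl_cons]
    -- the step preserves keys and refines the invariant with the pair (a, b) merged
    have hstep : (pvRelabelStep L [a, b]).keys = L.keys ∧
        (∀ u v, u ∈ L.keys → v ∈ L.keys →
          ((pvRelabelStep L [a, b]).getD u 0 = (pvRelabelStep L [a, b]).getD v 0 ↔
           Relation.EqvGen (fun x y => R x y ∨ (x = a ∧ y = b) ∨ (x = b ∧ y = a)) u v)) := by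
      by_cases heq : L.getD a 0 = L.getD b 0
      · have hstep0 : pvRelabelStep L [a, b] = L := by
          simp [pvRelabelStep, heq]
        rw [hstep0]
        refine ⟨rfl, fun u v hu hv => ?_⟩
        have hab : Relation.EqvGen R a b := (hinv a b ha hb).1 heq
        rw [hinv u v hu hv, pvEqvGen_join]
        constructor
        · exact Or.inl
        · rintro (h | ⟨h1, h2⟩ | ⟨h1, h2⟩)
          · exact h
          · exact Relation.EqvGen.trans _ _ _ (Relation.EqvGen.trans _ _ _ h1 hab) h2
          · exact Relation.EqvGen.trans _ _ _
              (Relation.EqvGen.trans _ _ _ h1 (Relation.EqvGen.symm _ _ hab)) h2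
      · have hbeq : (L.getD a 0 == L.getD b 0) = false := by simpa using heq
        have hstep0 : pvRelabelStep L [a, b]
            = L.keys.foldl (fun L' v => if L'.getD v 0 == L.getD b 0 then L'.insert v (L.getD a 0) else L') L := by
          simp [pvRelabelStep, hbeq]
        obtain ⟨hsk, hsv⟩ := pvRelabelScan (L.getD a 0) (L.getD b 0) L.keys L hnd (fun v hv => hv)
        rw [hstep0]
        refine ⟨hsk, fun u v hu hv => ?_⟩
        rw [hsv u, hsv v, if_pos hu, if_pos hv, pvIteMerge heq, pvEqvGen_join]
        have e1 : L.getD u 0 = L.getD v 0 ↔ Relation.EqvGen R u v := hinv u v hu hv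
        have e2 : L.getD u 0 = L.getD a 0 ↔ Relation.EqvGen R u a := hinv u a hu ha
        have e3 : L.getD v 0 = L.getD b 0 ↔ Relation.EqvGen R b v := by
          rw [hinv v b hv hb]
          exact ⟨fun h => Relation.EqvGen.symm _ _ h, fun h => Relation.EqvGen.symm _ _ h⟩
        have e4 : L.getD u 0 = L.getD b 0 ↔ Relation.EqvGen R u b := hinv u b hu hb
        have e5 : L.getD v 0 = L.getD a 0 ↔ Relation.EqvGen R a v := by
          rw [hinv v a hv ha]
          exact ⟨fun h => Relation.EqvGen.symm _ _ h, fun h => Relation.EqvGen.symm _ _ h⟩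
        rw [e1, e2, e3, e4, e5]
    obtain ⟨hsk, hsv⟩ := hstep
    obtain ⟨hk', hv'⟩ := ih (pvRelabelStep L [a, b])
      (fun x y => R x y ∨ (x = a ∧ y = b) ∨ (x = b ∧ y = a))
      (fun e he => hpre e (List.mem_cons_of_mem _ he))
      (hsk ▸ hnd)
      (fun e he x hx => hsk ▸ hkeys e (List.mem_cons_of_mem _ he) x hx)
      (fun u v hu hv => hsv u v (hsk ▸ hu) (hsk ▸ hv))
    refine ⟨hk'.trans hsk, fun u v hu hv => ?_⟩
    rw [hv' u v (hsk ▸ hu) (hsk ▸ hv)]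
    refine pvEqvGen_congr (fun x y => ?_)
    simp only [pvERel, List.mem_cons]
    constructor
    · rintro ((hr | ⟨rfl, rfl⟩ | ⟨rfl, rfl⟩) | ⟨e, he, h2⟩)
      · exact Or.inl hr
      · exact Or.inr ⟨[x, y], Or.inl rfl, Or.inl rfl⟩
      · exact Or.inr ⟨[y, x], Or.inl rfl, Or.inr rfl⟩
      · exact Or.inr ⟨e, Or.inr he, h2⟩
    · rintro (hr | ⟨e, he, h2⟩)
      · exact Or.inl (Or.inl hr)
      · rcases he with rfl | he'
        · simp only [List.cons.injEq, and_true] at h2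
          rcases h2 with ⟨rfl, rfl⟩ | ⟨rfl, rfl⟩
          · exact Or.inl (Or.inr (Or.inl ⟨rfl, rfl⟩))
          · exact Or.inl (Or.inr (Or.inr ⟨rfl, rfl⟩))
        · exact Or.inr ⟨e, he', h2⟩

-- ---- the counting folds of both programs are countP ----

lemma pvCountFold (hol : Int → Bool) :
    ∀ (l : List Int) (a b : Int),
    l.foldl (fun (c : Int × Int) u => if hol u then (c.1 + 1, c.2) else (c.1, c.2 + 1)) (a, b)
      = (a + (l.countP hol : Int), b + (l.countP (fun u => !hol u) : Int)) := by
  intro l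
  induction l with
  | nil => intro a b; simp
  | cons u t ih =>
    intro a b
    rw [List.foldl_cons]
    cases h : hol u
    · simp only [Bool.false_eq_true, if_false]
      rw [ih, List.countP_cons, List.countP_cons]
      simp [h, Prod.ext_iff]
      omega
    · simp only [if_true]
      rw [ih, List.countP_cons, List.countP_cons]
      simp [h, Prod.ext_iff]
      omega

-- ---- the outer loops over `nodes` stay in lockstep ----

lemma pvOuterLoop (nodes : List Int) (edges : List (List Int))
    (hpre : ∀ e ∈ edges, e.length = 2)
    (deg L : PySem.Dict Int Int)
    (hdeg : ∀ u, deg.getD u 0 = (((pvGraphA nodes edges).getD u []).length : Int))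
    (hLmem : ∀ x, x ∈ L.keys ↔ x ∈ (pvGraphA nodes edges).keys)
    (hLnd : L.keys.Nodup)
    (hlab : ∀ u v, u ∈ (pvGraphA nodes edges).keys → v ∈ (pvGraphA nodes edges).keys →
        (L.getD u 0 = L.getD v 0 ↔ pvConn (pvGraphA nodes edges) u v)) :
    ∀ (ns : List Int), (∀ n ∈ ns, n ∈ (pvGraphA nodes edges).keys) →
    ∀ (vA dB : PySem.Set Int) (hA rA hB rB : Int), hA = hB → rA = rB →
    (∀ x, x ∈ vA ↔ (x ∈ (pvGraphA nodes edges).keys ∧ L.getD x 0 ∈ dB)) →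
    (ns.foldl
      (fun (st : PySem.Set Int × Int × Int) start =>
        if PySem.Set.contains st.1 start then st
        else
          let r := pvBFSA (pvGraphA nodes edges) ((pvGraphA nodes edges).keys.length + 1)
            (PySem.Set.add st.1 start) [start] []
          let c := r.2.foldl
            (fun (c : Int × Int) u =>
              if PySem.Int.mod u 2 == PySem.Int.mod (PySem.List.len ((pvGraphA nodes edges).getD u []) - 1) 2
              then (c.1 + 1, c.2) else (c.1, c.2 + 1)) (0, 0)
          (r.1, (if c.2 == 1 then st.2.1 + 1 else st.2.1),
                (if c.1 == 1 then st.2.2 + 1 else st.2.2))) (vA, hA, rA)).2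
    = (ns.foldl
      (fun (st : PySem.Set Int × Int × Int) start =>
        let l0 := L.getD start 0
        if PySem.Set.contains st.1 l0 then st
        else
          let c := L.keys.foldl
            (fun (c : Int × Int) u =>
              if L.getD u 0 == l0 then
                if PySem.Int.mod u 2 == PySem.Int.mod (deg.getD u 0 - 1) 2
                then (c.1 + 1, c.2) else (c.1, c.2 + 1)
              else c) (0, 0)
          (PySem.Set.add st.1 l0,
           (if c.2 == 1 then st.2.1 + 1 else st.2.1),
           (if c.1 == 1 then st.2.2 + 1 else st.2.2))) (dB, hB, rB)).2 := by
  intro ns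
  induction ns with
  | nil =>
    intro _ vA dB hA rA hB rB hh hr _
    subst hh; subst hr; rfl
  | cons start rest ih =>
    intro hns vA dB hA rA hB rB hh hr hINV
    subst hh; subst hr
    have hstart : start ∈ (pvGraphA nodes edges).keys := hns start (by simp)
    have hcontains : PySem.Set.contains vA start = PySem.Set.contains dB (L.getD start 0) := by
      by_cases h : start ∈ vA
      · have h2 : L.getD start 0 ∈ dB := ((hINV start).1 h).2
        simp [h, h2]
      · have h2 : L.getD start 0 ∉ dB := fun hm => h ((hINV start).2 ⟨hstart, hm⟩)
        simp [h, h2]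
    cases hcs : PySem.Set.contains vA start with
    | true =>
      have hcsB : PySem.Set.contains dB (L.getD start 0) = true := hcontains ▸ hcs
      simp only [List.foldl_cons, hcs, hcsB, if_true]
      exact ih (fun n hn => hns n (by simp [hn])) vA dB hA rA hA rA rfl rfl hINV
    | false =>
      have hcsB : PySem.Set.contains dB (L.getD start 0) = false := hcontains ▸ hcs
      simp only [List.foldl_cons, hcs, hcsB, Bool.false_eq_true, if_false]
      have hsA : start ∉ vA := fun hm => by simp [hm] at hcs
      have hsB : L.getD start 0 ∉ dB := fun hm => by simp [hm] at hcsB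
      have hclosed : ∀ x ∈ vA, ∀ y ∈ (pvGraphA nodes edges).getD x [], y ∈ vA := by
        intro x hx y hy
        obtain ⟨hxk, hxd⟩ := (hINV x).1 hx
        have hyk : y ∈ (pvGraphA nodes edges).keys := pvClosed_graphA nodes edges x y hy
        have hconn : pvConn (pvGraphA nodes edges) x y := pvConn.tail (pvConn.refl x) hy
        have hxy : L.getD x 0 = L.getD y 0 := (hlab x y hxk hyk).2 hconn
        exact (hINV y).2 ⟨hyk, hxy ▸ hxd⟩
      obtain ⟨hchar, hnd2⟩ := pvBFSA_spec (pvClosed_graphA nodes edges)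
        ((pvGraphA nodes edges).keys.length + 1) (PySem.Set.add vA start) [start] []
        (List.nodup_singleton _)
        (fun x hx => by
          rw [List.mem_singleton] at hx
          exact hx ▸ (PySem.Set.mem_add _ _ _).2 (Or.inr rfl))
        (by simp) (by simp) List.nodup_nil
        (by
          have := List.length_filter_le
            (fun k => !(PySem.Set.contains (PySem.Set.add vA start) k)) (pvGraphA nodes edges).keys
          simp only [List.length_singleton]
          omega)
      have hreach := pvReach_iff_conn nodes edges hpre vA hclosed start hsA
      set r := pvBFSA (pvGraphA nodes edges) ((pvGraphA nodes edges).keys.length + 1)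
        (PySem.Set.add vA start) [start] [] with hrdef
      have hcomp : ∀ x, x ∈ r.2 ↔ pvConn (pvGraphA nodes edges) start x := by
        intro x
        rw [(hchar x).2]
        simp only [List.not_mem_nil, false_or]
        exact hreach x
      -- the filtered key list B counts over
      have hFmem : ∀ x, x ∈ L.keys.filter (fun u => L.getD u 0 == L.getD start 0)
          ↔ pvConn (pvGraphA nodes edges) start x := by
        intro x
        rw [List.mem_filter]
        constructor
        · rintro ⟨hxk, hxe⟩
          have hxk' := (hLmem x).1 hxk
          have hxe' : L.getD x 0 = L.getD start 0 := by simpa using hxe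
          exact pvConn_symm hpre ((hlab x start hxk' hstart).1 hxe')
        · intro hconn
          have hxk' : x ∈ (pvGraphA nodes edges).keys :=
            pvConn_mem_keys (pvClosed_graphA nodes edges) hconn hstart
          refine ⟨(hLmem x).2 hxk', ?_⟩
          have := (hlab start x hstart hxk').2 hconn
          simpa using this.symm
      have hperm : r.2.Perm (L.keys.filter (fun u => L.getD u 0 == L.getD start 0)) :=
        (List.perm_ext_iff_of_nodup hnd2 (hLnd.filter _)).2
          (fun x => (hcomp x).trans (hFmem x).symm)
      -- both counting folds are countP over perm-equal lists of the same predicate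
      have hBfold : L.keys.foldl
            (fun (c : Int × Int) u =>
              if L.getD u 0 == L.getD start 0 then
                if PySem.Int.mod u 2 == PySem.Int.mod (deg.getD u 0 - 1) 2
                then (c.1 + 1, c.2) else (c.1, c.2 + 1)
              else c) ((0 : Int), (0 : Int))
          = r.2.foldl
            (fun (c : Int × Int) u =>
              if PySem.Int.mod u 2 == PySem.Int.mod (PySem.List.len ((pvGraphA nodes edges).getD u []) - 1) 2
              then (c.1 + 1, c.2) else (c.1, c.2 + 1)) ((0 : Int), (0 : Int)) := by
        rw [← List.foldl_filter]
        rw [pvCountFold (fun u => PySem.Int.mod u 2 == PySem.Int.mod (deg.getD u 0 - 1) 2)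
            (L.keys.filter (fun u => L.getD u 0 == L.getD start 0)) 0 0,
          pvCountFold (fun u => PySem.Int.mod u 2
            == PySem.Int.mod (PySem.List.len ((pvGraphA nodes edges).getD u []) - 1) 2) r.2 0 0]
        have h1 : List.countP (fun u => PySem.Int.mod u 2 == PySem.Int.mod (deg.getD u 0 - 1) 2)
              (L.keys.filter (fun u => L.getD u 0 == L.getD start 0))
            = List.countP (fun u => PySem.Int.mod u 2
                == PySem.Int.mod (PySem.List.len ((pvGraphA nodes edges).getD u []) - 1) 2)
              (L.keys.filter (fun u => L.getD u 0 == L.getD start 0)) :=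
          List.countP_congr (fun x _ => by rw [hdeg x, PySem.List.len_eq])
        have h2 : List.countP (fun u => !(PySem.Int.mod u 2 == PySem.Int.mod (deg.getD u 0 - 1) 2))
              (L.keys.filter (fun u => L.getD u 0 == L.getD start 0))
            = List.countP (fun u => !(PySem.Int.mod u 2
                == PySem.Int.mod (PySem.List.len ((pvGraphA nodes edges).getD u []) - 1) 2))
              (L.keys.filter (fun u => L.getD u 0 == L.getD start 0)) :=
          List.countP_congr (fun x _ => by rw [hdeg x, PySem.List.len_eq])
        rw [h1, h2, hperm.countP_eq, hperm.countP_eq]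
      refine ih (fun n hn => hns n (by simp [hn])) r.1 (PySem.Set.add dB (L.getD start 0))
        _ _ _ _ ?_ ?_ ?_
      · rw [hBfold]
      · rw [hBfold]
      · intro x
        rw [(hchar x).1, PySem.Set.mem_add, PySem.Set.mem_add]
        constructor
        · rintro ((h | rfl) | h)
          · obtain ⟨hk, hd⟩ := (hINV x).1 h
            exact ⟨hk, Or.inl hd⟩
          · exact ⟨hstart, Or.inr rfl⟩
          · have hconn := (hreach x).1 h
            have hk : x ∈ (pvGraphA nodes edges).keys :=
              pvConn_mem_keys (pvClosed_graphA nodes edges) hconn hstart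
            exact ⟨hk, Or.inr ((hlab start x hstart hk).2 hconn).symm⟩
        · rintro ⟨hk, hd | hd⟩
          · exact Or.inl (Or.inl ((hINV x).2 ⟨hk, hd⟩))
          · have hconn : pvConn (pvGraphA nodes edges) start x :=
              (hlab start x hstart hk).1 hd.symm
            exact Or.inr ((hreach x).2 hconn)

-- ===== VERDICT (by name: the statement is the Claim_ definition above) =====
theorem solution_spec : Claim_equal_solution := by
  intro nodes edges _hdom hpre
  unfold Spec_solution solution solution_alt
  obtain ⟨hdk, hdv⟩ := pvDeg_spec nodes edges
  obtain ⟨h0mem, h0nd, h0val⟩ := pvLabelInit_spec (pvDeg nodes edges).keys PySem.Dict.empty (by simp)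
  have hgnd := pvGraphA_keys_nodup nodes edges
  -- the fully-merged label table and what label-equality means
  obtain ⟨hLkeys, hLinv⟩ := pvLabelFold edges
    ((pvDeg nodes edges).keys.foldl (fun L v => L.insert v v) PySem.Dict.empty)
    (fun _ _ => False) hpre
    (by
      have : ∀ x, x ∈ ((pvDeg nodes edges).keys.foldl (fun L v => L.insert v v) PySem.Dict.empty).keys
          ↔ x ∈ (pvDeg nodes edges).keys := by
        intro x
        rw [h0mem x]
        simp
      -- Nodup transfers along membership-preserving keys? use the conclusion of init spec
      exact h0nd)
    (by
      intro e he x hx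
      obtain ⟨a, b, rfl⟩ : ∃ a b, e = [a, b] := by
        match e, hpre e he with
        | [a, b], _ => exact ⟨a, b, rfl⟩
      obtain ⟨hak, hbk⟩ := pvEdge_endpoints_mem_keysA nodes edges hpre he
      rw [h0mem x]
      rcases List.mem_cons.1 hx with rfl | hx'
      · exact Or.inr (hdk ▸ hak)
      · rw [List.mem_singleton] at hx'
        exact Or.inr (hx' ▸ (hdk ▸ hbk)))
    (by
      intro u v hu hv
      have hu' : u ∈ (pvDeg nodes edges).keys := by
        have := (h0mem u).1 hu
        simpa using this
      have hv' : v ∈ (pvDeg nodes edges).keys := by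
        have := (h0mem v).1 hv
        simpa using this
      rw [h0val u, h0val v, if_pos hu', if_pos hv', pvEqvGen_false])
  have hLmem : ∀ x, x ∈ (pvLabels (pvDeg nodes edges) edges).keys
      ↔ x ∈ (pvGraphA nodes edges).keys := by
    intro x
    unfold pvLabels
    rw [hLkeys, h0mem x, hdk]
    simp
  have hLnd : (pvLabels (pvDeg nodes edges) edges).keys.Nodup := by
    unfold pvLabels
    rw [hLkeys]
    exact h0nd
  have hlab : ∀ u v, u ∈ (pvGraphA nodes edges).keys → v ∈ (pvGraphA nodes edges).keys →
      ((pvLabels (pvDeg nodes edges) edges).getD u 0 = (pvLabels (pvDeg nodes edges) edges).getD v 0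
        ↔ pvConn (pvGraphA nodes edges) u v) := by
    intro u v hu hv
    unfold pvLabels
    rw [hLinv u v (by rw [h0mem u, hdk]; simp [hu]) (by rw [h0mem v, hdk]; simp [hv])]
    rw [pvEqvGen_congr (fun x y => by simp : ∀ x y,
      ((fun x y => False ∨ pvERel edges x y) x y ↔ pvERel edges x y))]
    exact (pvConn_iff_eqvGen nodes edges hpre u v).symm
  have hEq := pvOuterLoop nodes edges hpre (pvDeg nodes edges) (pvLabels (pvDeg nodes edges) edges)
    hdv hLmem hLnd hlab nodes (pvNodes_mem_keysA nodes edges)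
    PySem.Set.empty PySem.Set.empty 0 0 0 0 rfl rfl (by simp [PySem.Set.empty])
  simp only [hEq]
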